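-- pv_equiv track=rewrite | github.com/elhussein-salah/bioinformatics-algorithms | src/core/approximate_matching.py | approximate_match_hamming
-- ===== SOURCE A (Python) =====
-- from typing import List, Tuple
--
-- def hamming_distance(s1: str, s2: str) -> int:
--     """
--     Calculate the Hamming distance between two strings of equal length.
--
--     The Hamming distance is the number of positions where the
--     corresponding characters differ.
--
--     Args:
--         s1: First string
--         s2: Second string (must be same length as s1)
--
--     Returns:
--         The Hamming distance
--
--     Raises:
--         ValueError: If strings have different lengths
--     """
--     if len(s1) != len(s2):
--         raise ValueError(f"Strings must have equal length: {len(s1)} != {len(s2)}")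
--
--     return sum(c1 != c2 for c1, c2 in zip(s1, s2))
--
-- def approximate_match_hamming(text: str, pattern: str, max_mismatches: int) -> List[int]:
--     """
--     Find all positions where pattern approximately matches text
--     with at most max_mismatches using Hamming distance.
--
--     This only considers substitutions, not insertions or deletions.
--
--     Args:
--         text: The text to search in
--         pattern: The pattern to search for
--         max_mismatches: Maximum allowed mismatches
--
--     Returns:
--         List of positions where approximate matches were found
--     """
--     if not pattern or not text or len(pattern) > len(text):
--         return []
--
--     matches = []
--     pattern_len = len(pattern)
--
--     for i in range(len(text) - pattern_len + 1):
--         substring = text[i:i + pattern_len]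
--         if hamming_distance(pattern, substring) <= max_mismatches:
--             matches.append(i)
--
--     return matches
-- ===== SOURCE B (Python) =====
-- def approximate_match_hamming(text, pattern, max_mismatches):
--     if not pattern or not text or len(pattern) > len(text):
--         return []
--     w = len(text) - len(pattern) + 1
--     # per-window mismatch counts, built pattern-offset by pattern-offset
--     counts = [0] * w
--     for j, pj in enumerate(pattern):
--         counts = [c + (pj != tc) for c, tc in zip(counts, text[j:])]
--     return [i for i, c in enumerate(counts) if c <= max_mismatches]
-- ===== Notes on version B (the rewrite author's own statement) =====
-- stated objective: alternative
-- what changed: Replaces the per-window Hamming-distance recomputation (slice + zip per window) with a transposed two-phase algorithm: build a per-window mismatch-counts table by iterating pattern offsets in the outer loop (updating all windows at once via zip with text[j:]), then collect window starts whose count is within the bound in a separate pass.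
import Mathlib
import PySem

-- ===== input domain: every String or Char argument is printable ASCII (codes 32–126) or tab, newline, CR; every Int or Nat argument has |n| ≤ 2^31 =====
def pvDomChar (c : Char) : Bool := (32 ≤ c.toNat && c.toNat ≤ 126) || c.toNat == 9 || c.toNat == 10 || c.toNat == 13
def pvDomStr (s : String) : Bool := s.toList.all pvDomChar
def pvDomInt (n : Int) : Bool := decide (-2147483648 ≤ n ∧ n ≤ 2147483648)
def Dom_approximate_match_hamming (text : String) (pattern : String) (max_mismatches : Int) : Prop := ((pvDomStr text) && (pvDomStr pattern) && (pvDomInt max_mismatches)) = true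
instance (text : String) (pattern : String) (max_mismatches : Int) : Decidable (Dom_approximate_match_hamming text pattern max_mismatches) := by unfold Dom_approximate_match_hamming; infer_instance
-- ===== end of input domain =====

-- B rebuilds the search as a transposed two-phase algorithm (per-window mismatch-counts table
-- built offset-by-offset, then a collection pass) instead of A's per-window Hamming distance;
-- objective: alternative (same asymptotic cost, different traversal).

-- ===== PORT A =====
-- Port of hamming_distance. The ValueError branch (unequal lengths) is ported as returning 0: it is
-- unreachable from approximate_match_hamming (every slice taken there has exactly pattern length),
-- so approximate_match_hamming never raises and the value on that branch is never used.
def hamming_distance (s1 : List Char) (s2 : List Char) : Int :=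
  if s1.length ≠ s2.length then 0
  else ((s1.zip s2).map (fun p => if p.1 ≠ p.2 then (1:Int) else 0)).sum

def approximate_match_hamming (text : String) (pattern : String) (max_mismatches : Int) : List Int :=
  let tl := text.toList
  let pl := pattern.toList
  if pl.length = 0 ∨ tl.length = 0 ∨ pl.length > tl.length then []
  else
    let pattern_len : Int := pl.length
    (PySem.List.pyRange 0 ((tl.length : Int) - pattern_len + 1)).foldl
      (fun ms i =>
        let substring := PySem.List.slice tl (some i) (some (i + pattern_len))
        if hamming_distance pl substring ≤ max_mismatches then ms ++ [i] else ms)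
      []

-- ===== PORT B =====
def approximate_match_hamming_alt (text : String) (pattern : String) (max_mismatches : Int) : List Int :=
  let tl := text.toList
  let pl := pattern.toList
  if pl.length = 0 ∨ tl.length = 0 ∨ pl.length > tl.length then []
  else
    let w := tl.length - pl.length + 1
    let counts := (PySem.List.enumerate pl).foldl
      (fun counts jp =>
        (counts.zip (PySem.List.slice tl (some jp.1) none)).map
          (fun ct => ct.1 + (if jp.2 ≠ ct.2 then (1:Int) else 0)))
      (List.replicate w (0:Int))
    (PySem.List.enumerate counts).foldl
      (fun acc ic => if ic.2 ≤ max_mismatches then acc ++ [ic.1] else acc)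
      []

-- ===== PRECONDITION & SPEC =====
def Spec_approximate_match_hamming (text : String) (pattern : String) (max_mismatches : Int) (out : List Int) : Prop := out = approximate_match_hamming_alt text pattern max_mismatches
instance (text : String) (pattern : String) (max_mismatches : Int) (out : List Int) : Decidable (Spec_approximate_match_hamming text pattern max_mismatches out) := by unfold Spec_approximate_match_hamming; infer_instance

-- ===== CLAIM (what is proved, stated in full; the proofs are below) =====
def Claim_equal_approximate_match_hamming : Prop := ∀ (text : String) (pattern : String) (max_mismatches : Int), Dom_approximate_match_hamming text pattern max_mismatches → Spec_approximate_match_hamming text pattern max_mismatches (approximate_match_hamming text pattern max_mismatches)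

-- ===== LEMMAS AND PROOFS =====

-- mismatch sum of two char lists (the value hamming_distance computes on equal lengths)
def pvS (s1 : List Char) (s2 : List Char) : Int :=
  ((s1.zip s2).map (fun p => if p.1 ≠ p.2 then (1:Int) else 0)).sum

-- B's counts-building fold, characterised elementwise
lemma pvFoldB (tl : List Char) : ∀ (pl' : List Char) (jn : Nat) (cs : List Int),
    cs.length + jn + pl'.length ≤ tl.length + 1 →
    (PySem.List.enumerate pl' (jn:Int)).foldl
      (fun counts jp =>
        (counts.zip (PySem.List.slice tl (some jp.1) none)).map
          (fun ct => ct.1 + (if jp.2 ≠ ct.2 then (1:Int) else 0))) cs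
    = cs.zipIdx.map (fun ci => ci.1 + pvS pl' (List.take pl'.length (List.drop (jn + ci.2) tl))) := by
  intro pl'
  induction pl' with
  | nil =>
    intro jn cs h
    simp [PySem.List.enumerate_nil, pvS]
  | cons p rest ih =>
    intro jn cs h
    have h' : cs.length + jn + rest.length + 1 ≤ tl.length + 1 := by simp at h; omega
    rw [PySem.List.enumerate_cons]
    simp only [List.foldl_cons]
    rw [PySem.List.slice_from tl (by positivity)]
    have hjn : ((jn:Int)).toNat = jn := by simp
    rw [hjn]
    have hlen : (((cs.zip (List.drop jn tl)).map
          (fun ct => ct.1 + (if p ≠ ct.2 then (1:Int) else 0)))).length = cs.length := by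
      simp; omega
    have hcast : ((jn:Int) + 1) = (((jn+1 : Nat)):Int) := by push_cast; ring
    rw [hcast, ih (jn+1) _ (by rw [hlen]; omega)]
    apply List.ext_getElem
    · simp; omega
    · intro i h1 h2
      simp only [List.length_map, List.length_zipIdx, hlen] at h1
      have hin : jn + i < tl.length := by omega
      simp only [List.getElem_map, List.getElem_zipIdx, List.getElem_zip, List.getElem_drop,
        Nat.zero_add]
      have hd : jn + 1 + i = (jn + i) + 1 := by omega
      rw [hd, List.drop_eq_getElem_cons hin]
      simp only [List.length_cons, List.take_succ_cons, List.zip_cons_cons, List.map_cons,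
        List.sum_cons, pvS]
      ring

lemma pvReplicateZip (w : Nat) (g : Nat → Int) :
    (List.replicate w (0:Int)).zipIdx.map (fun ci => ci.1 + g ci.2) = (List.range w).map g := by
  apply List.ext_getElem <;> simp

-- ===== VERDICT (by name: the statement is the Claim_ definition above) =====
theorem approximate_match_hamming_spec : Claim_equal_approximate_match_hamming := by
  unfold Claim_equal_approximate_match_hamming Spec_approximate_match_hamming
  intro text pattern k _
  unfold approximate_match_hamming approximate_match_hamming_alt
  set tl := text.toList with htl
  set pl := pattern.toList with hpl
  by_cases hg : pl.length = 0 ∨ tl.length = 0 ∨ pl.length > tl.length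
  · simp only [if_pos hg]
  · simp only [if_neg hg]
    push Not at hg
    obtain ⟨hm0, hn0, hmn⟩ := hg
    set n := tl.length with hn
    set m := pl.length with hm
    set w := n - m + 1 with hw
    have hcounts := pvFoldB tl pl 0 (List.replicate w 0) (by simp [hw]; omega)
    simp only [Nat.cast_zero, Nat.zero_add] at hcounts
    rw [hcounts, pvReplicateZip w (fun i => pvS pl (List.take m (List.drop i tl)))]
    rw [PySem.List.enumerate_eq_map_pyRange _ 0]
    have hlenc : PySem.List.len ((List.range w).map (fun i => pvS pl (List.take m (List.drop i tl)))) = (w : Int) := by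
      simp [PySem.List.len]
    rw [hlenc, List.foldl_map]
    have hcast : (n : Int) - (m : Int) + 1 = (w : Int) := by omega
    rw [hcast]
    apply PySem.List.foldl_congr_mem
    intro acc x hx
    rw [PySem.List.mem_pyRange_one] at hx
    obtain ⟨hx0, hxw⟩ := hx
    obtain ⟨i, rfl⟩ : ∃ i : Nat, x = (i : Int) := ⟨x.toNat, by omega⟩
    have hi : i < w := by exact_mod_cast hxw
    have hval : PySem.List.pyGetD ((List.range w).map (fun i => pvS pl (List.take m (List.drop i tl)))) (i : Int) 0
        = pvS pl (List.take m (List.drop i tl)) := by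
      rw [PySem.List.pyGetD_natCast]
      simp [List.getD_eq_getElem?_getD, hi]
    rw [hval]
    have hsl : PySem.List.slice tl (some (i : Int)) (some ((i : Int) + (m : Int))) = List.take m (List.drop i tl) :=
      PySem.List.slice_natCast_add tl i m
    rw [hsl]
    have hlw : (List.take m (List.drop i tl)).length = m := by
      simp; omega
    have hh : hamming_distance pl (List.take m (List.drop i tl)) = pvS pl (List.take m (List.drop i tl)) := by
      unfold hamming_distance pvS
      rw [if_neg (by rw [hlw, hm]; simp)]
    rw [hh]
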